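-- pv_equiv track=rewrite | github.com/TegarSubagdja/Python_TA-Scratch | Method/TurnPenaltyFunction.py | Turn
-- ===== SOURCE A (Python) =====
-- def normalize(dx, dy):
--     if dx != 0: dx = dx // abs(dx)
--     if dy != 0: dy = dy // abs(dy)
--     return (dx, dy)
--
-- def Turn(path):
--     turns = []
--
--     for i in range(1, len(path) - 1):
--         x_prev, y_prev = path[i - 1]
--         x_curr, y_curr = path[i]
--         x_next, y_next = path[i + 1]
--
--         dir1 = normalize(x_curr - x_prev, y_curr - y_prev)
--         dir2 = normalize(x_next - x_curr, y_next - y_curr)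
--
--         if dir1 != dir2:
--             turns.append(path[i])  # titik tengah adalah titik belok
--
--     return turns
-- ===== SOURCE B (Python) =====
-- def _dir(p, q):
--     dx = q[0] - p[0]
--     dy = q[1] - p[1]
--     if dx != 0: dx = dx // abs(dx)
--     if dy != 0: dy = dy // abs(dy)
--     return (dx, dy)
--
-- def Turn(path):
--     n = len(path)
--     turns = []
--     i = 0
--     while i + 1 < n:
--         d = _dir(path[i], path[i + 1])
--         j = i + 1
--         while j + 1 < n and _dir(path[j], path[j + 1]) == d:
--             j += 1
--         if j + 1 < n:
--             turns.append(path[j])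
--         i = j
--     return turns
-- ===== Notes on version B (the rewrite author's own statement) =====
-- stated objective: alternative
-- what changed: Replaces the single index loop that tests every interior point with a two-pointer run-skipping scan: an outer loop fixes the direction of the current straight run, an inner loop advances to the run's end, and that end point is recorded as a turn unless it closes the path.
import Mathlib
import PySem

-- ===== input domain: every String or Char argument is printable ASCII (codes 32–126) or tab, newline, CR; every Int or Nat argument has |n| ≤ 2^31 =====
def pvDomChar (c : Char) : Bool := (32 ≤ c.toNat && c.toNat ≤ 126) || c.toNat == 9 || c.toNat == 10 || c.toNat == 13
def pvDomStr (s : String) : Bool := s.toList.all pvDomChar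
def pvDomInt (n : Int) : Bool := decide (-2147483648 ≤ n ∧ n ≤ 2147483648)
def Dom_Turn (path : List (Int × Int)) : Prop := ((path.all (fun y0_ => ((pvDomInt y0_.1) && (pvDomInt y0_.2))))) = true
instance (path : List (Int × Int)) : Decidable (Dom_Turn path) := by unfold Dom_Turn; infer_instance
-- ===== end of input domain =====

-- B replaces the per-interior-point test with a two-pointer run-skipping scan
-- (outer loop per straight run, inner loop to the run's end); objective: alternative, same cost.

-- ===== PORT A =====
def pyNormalize (dx dy : Int) : Int × Int :=
  let dx' := if dx ≠ 0 then PySem.Int.floordiv dx |dx| else dx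
  let dy' := if dy ≠ 0 then PySem.Int.floordiv dy |dy| else dy
  (dx', dy')

def Turn (path : List (Int × Int)) : List (Int × Int) :=
  (PySem.List.pyRange 1 ((path.length : Int) - 1) 1).foldl
    (fun turns i =>
      let pPrev := PySem.List.pyGetD path (i - 1) (0, 0)
      let pCurr := PySem.List.pyGetD path i (0, 0)
      let pNext := PySem.List.pyGetD path (i + 1) (0, 0)
      let dir1 := pyNormalize (pCurr.1 - pPrev.1) (pCurr.2 - pPrev.2)
      let dir2 := pyNormalize (pNext.1 - pCurr.1) (pNext.2 - pCurr.2)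
      if dir1 ≠ dir2 then turns ++ [pCurr] else turns) []

-- ===== PORT B =====
-- _dir in Source B
def segDir (p q : Int × Int) : Int × Int :=
  let dx := q.1 - p.1
  let dy := q.2 - p.2
  (if dx ≠ 0 then PySem.Int.floordiv dx |dx| else dx,
   if dy ≠ 0 then PySem.Int.floordiv dy |dy| else dy)

-- _dir(path[k], path[k+1]); the loops only index with 0 ≤ k and k+1 < len(path),
-- so getD with a dummy default is exact for Python's path[k]
def dirAtB (path : List (Int × Int)) (k : Nat) : Int × Int :=
  segDir (path.getD k (0, 0)) (path.getD (k + 1) (0, 0))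

-- inner while loop of Source B
def innerB (path : List (Int × Int)) (n : Nat) (d : Int × Int) (j : Nat) : Nat :=
  if j + 1 < n ∧ dirAtB path j = d then innerB path n d (j + 1) else j
termination_by n - j
decreasing_by omega

-- the inner while loop never moves its index backwards (used for outerB's termination)
lemma innerB_ge (path : List (Int × Int)) (n : Nat) (d : Int × Int) :
    ∀ j, j ≤ innerB path n d j := by
  intro j
  induction j using innerB.induct path n d with
  | case1 j h ih => rw [innerB, if_pos h]; omega
  | case2 j hn => rw [innerB, if_neg hn]

-- outer while loop of Source B
def outerB (path : List (Int × Int)) (n : Nat) (i : Nat) (turns : List (Int × Int)) :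
    List (Int × Int) :=
  if i + 1 < n then
    let d := dirAtB path i
    let j := innerB path n d (i + 1)
    outerB path n j (if j + 1 < n then turns ++ [path.getD j (0, 0)] else turns)
  else turns
termination_by n - i
decreasing_by have := innerB_ge path n (dirAtB path i) (i + 1); omega

def Turn_alt (path : List (Int × Int)) : List (Int × Int) :=
  outerB path path.length 0 []

-- ===== PRECONDITION & SPEC =====
def Spec_Turn (path : List (Int × Int)) (out : List (Int × Int)) : Prop := out = Turn_alt path
instance (path : List (Int × Int)) (out : List (Int × Int)) : Decidable (Spec_Turn path out) := by unfold Spec_Turn; infer_instance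

-- ===== CLAIM (what is proved, stated in full; the proofs are below) =====
def Claim_equal_Turn : Prop := ∀ (path : List (Int × Int)), Dom_Turn path → Spec_Turn path (Turn path)

-- ===== LEMMAS AND PROOFS =====

-- common recursive characterisation of both programs
def turnsOf : List (Int × Int) → List (Int × Int)
  | a :: b :: c :: rest => (if segDir a b ≠ segDir b c then [b] else []) ++ turnsOf (b :: c :: rest)
  | _ => []

lemma turnsOf_short (l : List (Int × Int)) (h : l.length ≤ 2) : turnsOf l = [] := by
  match l, h with
  | [], _ => rfl
  | [a], _ => rfl
  | [a, b], _ => rfl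

lemma drop_cons_getD (path : List (Int × Int)) (m : Nat) (h : m < path.length) :
    path.drop m = path.getD m (0, 0) :: path.drop (m + 1) := by
  rw [List.getD_eq_getElem path _ h, List.drop_eq_getElem_cons h]

-- inner-loop invariant: skipping a run of direction d leaves exactly the turn at the run's end
lemma inner_spec (path : List (Int × Int)) (d : Int × Int) :
    ∀ (k m : Nat), path.length - m ≤ k → dirAtB path m = d →
      turnsOf (path.drop m) =
        (if innerB path path.length d (m + 1) + 1 < path.length
          then [path.getD (innerB path path.length d (m + 1)) (0, 0)] else []) ++
        turnsOf (path.drop (innerB path path.length d (m + 1))) := by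
  intro k
  induction k with
  | zero =>
      intro m hle hd
      have hc : ¬ (m + 1 + 1 < path.length ∧ dirAtB path (m + 1) = d) := by
        intro h; exact absurd h.1 (by omega)
      have hstop : innerB path path.length d (m + 1) = m + 1 := by
        rw [innerB, if_neg hc]
      rw [hstop, if_neg (by omega : ¬ m + 1 + 1 < path.length)]
      rw [turnsOf_short _ (by simp; omega), turnsOf_short _ (by simp; omega)]
      rfl
  | succ k ih =>
      intro m hle hd
      have hdm : segDir (path.getD m (0,0)) (path.getD (m+1) (0,0)) = d := hd
      by_cases hc : m + 1 + 1 < path.length ∧ dirAtB path (m + 1) = d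
      · obtain ⟨h2, hd1⟩ := hc
        have hdm1 : segDir (path.getD (m+1) (0,0)) (path.getD (m+2) (0,0)) = d := hd1
        have hstep : innerB path path.length d (m + 1) = innerB path path.length d (m + 1 + 1) := by
          rw [innerB, if_pos ⟨h2, hd1⟩]
        have e0 := drop_cons_getD path m (by omega)
        have e1 := drop_cons_getD path (m + 1) (by omega)
        have e2 := drop_cons_getD path (m + 2) h2
        have hturn : turnsOf (path.drop m) = turnsOf (path.drop (m + 1)) := by
          rw [e0, e1, e2, turnsOf, ← e2, if_neg (by rw [hdm, hdm1]; simp), ← e1]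
          rfl
        rw [hstep, hturn]
        exact ih (m + 1) (by omega) hd1
      · have hstop : innerB path path.length d (m + 1) = m + 1 := by
          rw [innerB, if_neg hc]
        rw [hstop]
        by_cases h2 : m + 1 + 1 < path.length
        · have hd1 : segDir (path.getD (m+1) (0,0)) (path.getD (m+2) (0,0)) ≠ d :=
            fun h => hc ⟨h2, h⟩
          have e0 := drop_cons_getD path m (by omega)
          have e1 := drop_cons_getD path (m + 1) (by omega)
          have e2 := drop_cons_getD path (m + 2) h2
          rw [e0, e1, e2, turnsOf, ← e2, ← e1, if_pos h2,
              if_pos (by rw [hdm]; exact fun h => hd1 h.symm)]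
        · rw [if_neg h2]
          rw [turnsOf_short _ (by simp; omega), turnsOf_short _ (by simp; omega)]
          rfl

-- outer-loop invariant
lemma outer_spec (path : List (Int × Int)) :
    ∀ (k i : Nat) (turns : List (Int × Int)), path.length - i ≤ k →
      outerB path path.length i turns = turns ++ turnsOf (path.drop i) := by
  intro k
  induction k with
  | zero =>
      intro i turns hle
      have h : ¬ i + 1 < path.length := by omega
      rw [outerB, if_neg h, turnsOf_short _ (by simp; omega)]
      simp
  | succ k ih =>
      intro i turns hle
      by_cases h : i + 1 < path.length
      · rw [outerB, if_pos h]
        have hge := innerB_ge path path.length (dirAtB path i) (i + 1)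
        rw [ih _ _ (by omega)]
        rw [inner_spec path (dirAtB path i) (path.length - i) i (by omega) rfl]
        split_ifs with hj <;> simp
      · rw [outerB, if_neg h, turnsOf_short _ (by simp; omega)]
        simp

lemma alt_eq (path : List (Int × Int)) : Turn_alt path = turnsOf path := by
  have := outer_spec path path.length 0 [] (by omega)
  simpa [Turn_alt] using this

def A_f (path : List (Int × Int)) (i : Int) : Int × Int := PySem.List.pyGetD path i (0, 0)

def A_p (path : List (Int × Int)) (i : Int) : Bool :=
  decide (pyNormalize ((A_f path i).1 - (A_f path (i - 1)).1) ((A_f path i).2 - (A_f path (i - 1)).2)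
        ≠ pyNormalize ((A_f path (i + 1)).1 - (A_f path i).1) ((A_f path (i + 1)).2 - (A_f path i).2))

lemma turn_filter (path : List (Int × Int)) :
    Turn path = ((PySem.List.pyRange 1 ((path.length : Int) - 1) 1).filter (A_p path)).map (A_f path) := by
  have h := PySem.List.foldl_append_if (A_p path) (A_f path)
      (PySem.List.pyRange 1 ((path.length : Int) - 1) 1) []
  rw [Turn, ← List.nil_append (List.map _ _), ← h]
  congr 1
  funext acc i
  simp [A_p, A_f]

lemma Af_succ (x : Int × Int) (xs : List (Int × Int)) (n : Nat) :
    A_f (x :: xs) (((n + 1 : Nat)) : Int) = A_f xs n := by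
  rw [A_f, A_f, PySem.List.pyGetD_natCast, PySem.List.pyGetD_natCast, List.getD_cons_succ]

lemma Ap_succ (x : Int × Int) (xs : List (Int × Int)) (m : Nat) :
    A_p (x :: xs) (((m + 1 + 1 : Nat)) : Int) = A_p xs (((m + 1 : Nat)) : Int) := by
  unfold A_p
  rw [show (((m + 1 + 1 : Nat)) : Int) - 1 = (((m + 1 : Nat)) : Int) by push_cast; ring,
      show (((m + 1 + 1 : Nat)) : Int) + 1 = (((m + 1 + 1 + 1 : Nat)) : Int) by push_cast; ring,
      show (((m + 1 : Nat)) : Int) - 1 = ((m : Nat) : Int) by push_cast; ring,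
      show (((m + 1 : Nat)) : Int) + 1 = (((m + 1 + 1 : Nat)) : Int) by push_cast; ring,
      Af_succ, Af_succ, Af_succ]

lemma rangeTurn (path : List (Int × Int)) :
    ((List.range (path.length - 2)).filter (fun (k : Nat) => A_p path (1 + (k : Int)))).map
      (fun (k : Nat) => A_f path (1 + (k : Int))) = turnsOf path := by
  induction path using turnsOf.induct with
  | case1 a b c rest ih =>
      have hlen : (a :: b :: c :: rest).length - 2 = rest.length + 1 := by simp
      have hshift : (fun (k : Nat) => A_p (a :: b :: c :: rest) (1 + ((Nat.succ k : Nat) : Int)))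
          = fun (k : Nat) => A_p (b :: c :: rest) (1 + (k : Int)) := by
        funext k
        rw [show (1 + ((Nat.succ k : Nat) : Int)) = ((k + 1 + 1 : Nat) : Int) by push_cast; ring,
            Ap_succ, show (((k + 1 : Nat)) : Int) = 1 + (k : Int) by push_cast; ring]
      have hshiftf : ∀ k : Nat, A_f (a :: b :: c :: rest) (1 + ((Nat.succ k : Nat) : Int))
          = A_f (b :: c :: rest) (1 + (k : Int)) := by
        intro k
        rw [show (1 + ((Nat.succ k : Nat) : Int)) = ((k + 1 : Nat) : Int) + 1 by push_cast; ring]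
        rw [show ((k + 1 : Nat) : Int) + 1 = ((k + 1 + 1 : Nat) : Int) by push_cast; ring,
            Af_succ, show ((k + 1 : Nat) : Int) = 1 + (k : Int) by push_cast; ring]
      have e0 : A_f (a :: b :: c :: rest) 0 = a := by
        rw [A_f, show (0 : Int) = ((0 : Nat) : Int) by norm_num, PySem.List.pyGetD_natCast]; rfl
      have e1 : A_f (a :: b :: c :: rest) 1 = b := by
        rw [A_f, show (1 : Int) = ((1 : Nat) : Int) by norm_num, PySem.List.pyGetD_natCast]; rfl
      have e2 : A_f (a :: b :: c :: rest) 2 = c := by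
        rw [A_f, show (2 : Int) = ((2 : Nat) : Int) by norm_num, PySem.List.pyGetD_natCast]; rfl
      have hhead : A_p (a :: b :: c :: rest) (1 + ((0 : Nat) : Int)) =
          decide (segDir a b ≠ segDir b c) := by
        rw [A_p, show (1 : Int) + ((0 : Nat) : Int) = 1 by norm_num,
            show (1 : Int) - 1 = 0 by norm_num, show (1 : Int) + 1 = 2 by norm_num, e0, e1, e2]
        rfl
      have hheadf : A_f (a :: b :: c :: rest) (1 + ((0 : Nat) : Int)) = b := by
        rw [show (1 : Int) + ((0 : Nat) : Int) = 1 by norm_num, e1]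
      have ih' : ((List.range rest.length).filter (fun (k : Nat) => A_p (b :: c :: rest) (1 + (k : Int)))).map
          (fun (k : Nat) => A_f (b :: c :: rest) (1 + (k : Int))) = turnsOf (b :: c :: rest) := by
        simpa using ih
      rw [hlen, List.range_succ_eq_map, List.filter_cons, List.filter_map]
      rw [show ((fun (k : Nat) => A_p (a :: b :: c :: rest) (1 + (k : Int))) ∘ Nat.succ)
            = fun (k : Nat) => A_p (b :: c :: rest) (1 + (k : Int)) from hshift]
      rw [turnsOf, hhead]
      by_cases h : segDir a b = segDir b c
      · simp only [h, ne_eq, not_true_eq_false, decide_false, Bool.false_eq_true, if_false,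
          List.map_map]
        rw [show ((fun (k : Nat) => A_f (a :: b :: c :: rest) (1 + (k : Int))) ∘ Nat.succ)
              = fun (k : Nat) => A_f (b :: c :: rest) (1 + (k : Int)) from funext hshiftf]
        simpa [h] using ih'
      · simp only [h, ne_eq, not_false_eq_true, decide_true, if_true, List.map_cons, List.map_map]
        rw [hheadf]
        rw [show ((fun (k : Nat) => A_f (a :: b :: c :: rest) (1 + (k : Int))) ∘ Nat.succ)
              = fun (k : Nat) => A_f (b :: c :: rest) (1 + (k : Int)) from funext hshiftf]
        rw [ih']; rfl
  | case2 path h =>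
      match path, h with
      | [], _ => rfl
      | [a], _ => rfl
      | [a, b], _ => rfl
      | a :: b :: c :: r, h => exact (h a b c r rfl).elim

lemma a_eq (path : List (Int × Int)) : Turn path = turnsOf path := by
  rw [turn_filter, PySem.List.pyRange_one]
  have : ((path.length : Int) - 1 - 1).toNat = path.length - 2 := by omega
  rw [List.filter_map, List.map_map, this, ← rangeTurn path]
  rfl

-- ===== VERDICT (by name: the statement is the Claim_ definition above) =====
theorem Turn_spec : Claim_equal_Turn := by
  intro path _
  unfold Spec_Turn
  rw [a_eq, alt_eq]
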